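-- pv_equiv track=rewrite | github.com/datasciencecampus/SigNow_ONS_Turing | src/signow/signature_functions/compute_linear_sigs.py | find_single_sig_index
-- ===== SOURCE A (Python) =====
-- def find_single_sig_index(dim: int, index: int, level: int) -> list:
--     """Find the indices for signature of 1 particular variable.
--
--     This variable is in the dimension given by index on original path.
--
--     Parameters
--     ----------
--     dim : int
--         the dimension of the features
--     index : int
--         the position of the variable of interest
--     level : int
--         truncation level of the signature
--
--     Returns
--     -------
--     list
--         A list of indices corresponding to signatures of the variable of
--         interest (including the constant 1 term at the 0th order), e.g.
--         if index=1, those corresponding to signatures (), (1), (1,1), ...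
--     """
--
--     ind = [0]
--     base_ind = 0
--     for i in range(0, level):
--         base_ind += dim ** (i)
--         increment = (index) * base_ind
--         ind.append(base_ind + increment)
--     return ind
-- ===== SOURCE B (Python) =====
-- def find_single_sig_index(dim: int, index: int, level: int) -> list:
--     """Closed-form re-implementation: ind[k] = (1+index) * (dim**k - 1)//(dim-1),
--     the geometric-series partial sum, built in one comprehension (dim == 1 special-cased)."""
--     n = max(level, 0)
--     if dim == 1:
--         return [(1 + index) * k for k in range(n + 1)]
--     return [(1 + index) * (dim ** k - 1) // (dim - 1) for k in range(n + 1)]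
-- ===== Notes on version B (the rewrite author's own statement) =====
-- stated objective: simpler
-- what changed: Replaced the accumulating partial-sum loop (running base_ind) by a closed-form geometric-series formula (1+index)*(dim**k - 1)//(dim-1) computed independently per k in one comprehension, with dim == 1 special-cased to (1+index)*k.
import Mathlib
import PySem

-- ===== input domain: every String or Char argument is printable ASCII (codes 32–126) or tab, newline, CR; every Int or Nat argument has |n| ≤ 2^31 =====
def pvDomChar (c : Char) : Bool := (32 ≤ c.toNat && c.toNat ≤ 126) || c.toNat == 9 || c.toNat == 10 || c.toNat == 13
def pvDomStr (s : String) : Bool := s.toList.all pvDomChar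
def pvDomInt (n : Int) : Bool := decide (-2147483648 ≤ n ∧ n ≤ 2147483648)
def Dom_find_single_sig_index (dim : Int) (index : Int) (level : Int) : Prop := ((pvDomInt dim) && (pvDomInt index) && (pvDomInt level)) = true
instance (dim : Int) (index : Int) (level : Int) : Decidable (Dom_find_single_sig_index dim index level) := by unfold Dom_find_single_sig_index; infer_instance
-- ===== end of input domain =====

-- B replaces A's accumulating partial-sum loop by a closed-form geometric-series formula in one comprehension (objective: simpler).

-- ===== PORT A =====
def find_single_sig_index (dim : Int) (index : Int) (level : Int) : List Int :=
  ((PySem.List.pyRange 0 level 1).foldl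
    (fun (st : List Int × Int) i =>
      let base_ind := st.2 + dim ^ i.toNat
      let increment := index * base_ind
      (st.1 ++ [base_ind + increment], base_ind))
    ([0], 0)).1

-- ===== PORT B =====
def find_single_sig_index_alt (dim : Int) (index : Int) (level : Int) : List Int :=
  if dim = 1 then
    (PySem.List.pyRange 0 (max level 0 + 1) 1).map (fun k => (1 + index) * k)
  else
    (PySem.List.pyRange 0 (max level 0 + 1) 1).map (fun k =>
      PySem.Int.floordiv ((1 + index) * (dim ^ k.toNat - 1)) (dim - 1))

-- ===== PRECONDITION & SPEC =====
def Spec_find_single_sig_index (dim : Int) (index : Int) (level : Int) (out : List Int) : Prop := out = find_single_sig_index_alt dim index level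
instance (dim : Int) (index : Int) (level : Int) (out : List Int) : Decidable (Spec_find_single_sig_index dim index level out) := by unfold Spec_find_single_sig_index; infer_instance

-- ===== CLAIM (what is proved, stated in full; the proofs are below) =====
def Claim_equal_find_single_sig_index : Prop := ∀ (dim : Int) (index : Int) (level : Int), Dom_find_single_sig_index dim index level → Spec_find_single_sig_index dim index level (find_single_sig_index dim index level)

-- ===== LEMMAS AND PROOFS =====

-- geometric partial sum: gs dim k = 1 + dim + … + dim^(k-1)
def gs (dim : Int) (k : Nat) : Int := ∑ i ∈ Finset.range k, dim ^ i

lemma gs_one (k : Nat) : gs 1 k = k := by simp [gs]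

lemma closed_form (dim index : Int) (h : dim ≠ 1) (k : Nat) :
    PySem.Int.floordiv ((1 + index) * (dim ^ k - 1)) (dim - 1) = (1 + index) * gs dim k := by
  have hb : dim - 1 ≠ 0 := sub_ne_zero.mpr h
  have hg : dim ^ k - 1 = gs dim k * (dim - 1) := (geom_sum_mul dim k).symm
  rw [hg, ← mul_assoc]
  simp [PySem.Int.floordiv, Int.mul_fdiv_cancel _ hb]

lemma A_char (dim index : Int) (m : Nat) :
    (PySem.List.pyRange 0 (m : Int) 1).foldl
      (fun (st : List Int × Int) i =>
        let base_ind := st.2 + dim ^ i.toNat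
        let increment := index * base_ind
        (st.1 ++ [base_ind + increment], base_ind))
      ([0], 0)
    = ((List.range (m + 1)).map (fun k => (1 + index) * gs dim k), gs dim m) := by
  induction m with
  | zero => simp [PySem.List.pyRange_one_eq_nil, gs]
  | succ m ih =>
    have hc : ((m + 1 : Nat) : Int) = (m : Int) + 1 := by push_cast; ring
    rw [hc, PySem.List.pyRange_one_succ_right (by positivity), List.foldl_append, ih]
    have hbase : gs dim m + dim ^ ((m : Int)).toNat = gs dim (m + 1) := by
      simp [gs, Finset.sum_range_succ]
    simp only [List.foldl_cons, List.foldl_nil, hbase]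
    rw [List.range_succ (n := m + 1), List.map_append]
    refine Prod.ext ?_ rfl
    simp only [List.map_cons, List.map_nil]
    congr 2
    ring

lemma B_char (dim index level : Int) :
    find_single_sig_index_alt dim index level
    = (List.range (level.toNat + 1)).map (fun k => (1 + index) * gs dim k) := by
  unfold find_single_sig_index_alt
  have hn : ((max level 0 + 1 : Int) - 0).toNat = level.toNat + 1 := by omega
  by_cases h : dim = 1
  · subst h
    rw [if_pos rfl, PySem.List.pyRange_one, hn, List.map_map]
    refine List.map_congr_left (fun k _ => ?_)
    simp [gs_one]
  · rw [if_neg h, PySem.List.pyRange_one, hn, List.map_map]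
    refine List.map_congr_left (fun k _ => ?_)
    simp only [Function.comp]
    rw [show ((0 : Int) + (k : Int)).toNat = k by omega]
    exact closed_form dim index h k

lemma pyRange_toNat (level : Int) :
    PySem.List.pyRange 0 level 1 = PySem.List.pyRange 0 ((level.toNat : Nat) : Int) 1 := by
  rw [PySem.List.pyRange_one, PySem.List.pyRange_one,
    show (((level.toNat : Nat) : Int) - 0).toNat = (level - 0).toNat by omega]

-- ===== VERDICT (by name: the statement is the Claim_ definition above) =====
theorem find_single_sig_index_spec : Claim_equal_find_single_sig_index := by
  intro dim index level _
  unfold Spec_find_single_sig_index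
  rw [B_char]
  unfold find_single_sig_index
  rw [pyRange_toNat, A_char dim index level.toNat]
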